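-- pv_equiv track=rewrite | github.com/JKbin/Study-of-Coding-with-Python | Programmers/구현/방금그곡(Lv.2).py | solution
-- ===== SOURCE A (Python) =====
-- def code_chagne(code):
--     temp = code.replace('C#','c').replace('D#','d').replace('F#','f').replace('G#','g').replace('A#','a')
--     return temp
--
-- def convertToTime(s):
--     s = s.split(':')
--     return int(s[0])*60 + int(s[1])
--
-- def calc(time,a):
--     n = len(a)
--     mod = divmod(time,n)
--     temp = a * (mod[0]) + a[:mod[1]]
--     return temp
--
-- def solution(m,musicinfos):
--     music_answer = []
--
--     for i in range(len(musicinfos)):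
--         info = musicinfos[i].split(",")
--         start_time = info[0]
--         end_time = info[1]
--         title = info[2]
--         play_code = info[3]
--
--         change_code = code_chagne(m)                # 기억한 멜로디
--         play_change_code = code_chagne(play_code)       # 악보의 # 변환
--
--         total_time = convertToTime(end_time)-convertToTime(start_time)
--         total_code = calc(total_time,play_change_code)
--
--         if change_code in total_code:
--             music_answer.append([total_time,i,title])
--
--
--     if not music_answer:
--         return '(None)'
--     else:
--         music_answer.sort(key=lambda x:(-x[0],x[1]))
--         return music_answer[0][2]
-- ===== SOURCE B (Python) =====
-- def code_change(code):
--     return code.replace('C#','c').replace('D#','d').replace('F#','f').replace('G#','g').replace('A#','a')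
--
-- def to_time(s):
--     p = s.split(':')
--     return int(p[0])*60 + int(p[1])
--
-- def solution(m, musicinfos):
--     melody = code_change(m)
--     best = None                      # (total_time, title) of the best match so far
--     for info in musicinfos:
--         p = info.split(',')
--         t = to_time(p[1]) - to_time(p[0])
--         sheet = code_change(p[3])
--         q, r = divmod(t, len(sheet))
--         full = sheet * q + sheet[:r]
--         if melody in full and (best is None or t > best[0]):
--             best = (t, p[2])
--     return best[1] if best is not None else '(None)'
-- ===== Notes on version B (the rewrite author's own statement) =====
-- stated objective: simpler
-- what changed: B replaces A's index loop that appends [time,i,title] triples to a list and then sorts it by (-time, i) to take the first, with a single pass over musicinfos keeping one Optional (best_time, title) accumulator updated on a strict '>' comparison, which reproduces A's max-time/earliest-index tie-break without building or sorting any list.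
import Mathlib
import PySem

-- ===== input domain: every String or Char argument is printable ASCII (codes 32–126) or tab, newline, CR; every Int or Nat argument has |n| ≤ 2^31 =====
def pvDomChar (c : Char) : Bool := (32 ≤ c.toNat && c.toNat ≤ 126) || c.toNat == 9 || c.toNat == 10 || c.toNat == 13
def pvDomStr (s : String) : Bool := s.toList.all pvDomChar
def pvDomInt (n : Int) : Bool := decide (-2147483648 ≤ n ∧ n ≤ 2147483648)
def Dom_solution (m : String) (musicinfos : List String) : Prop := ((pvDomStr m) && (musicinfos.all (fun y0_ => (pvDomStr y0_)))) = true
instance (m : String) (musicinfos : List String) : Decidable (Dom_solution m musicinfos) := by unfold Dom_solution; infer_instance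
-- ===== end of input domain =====

-- B replaces A's append-all-matches-then-sort-by-(-time,index) selection with a single pass keeping one
-- Optional (best_time, title) accumulator updated on a strict '>' comparison (objective: simpler).

-- ===== PORT A =====
def codeChange (code : String) : String :=
  PySem.Str.replace (PySem.Str.replace (PySem.Str.replace (PySem.Str.replace
    (PySem.Str.replace code "C#" "c") "D#" "d") "F#" "f") "G#" "g") "A#" "a"

def convertToTime (s : String) : Int :=
  let p := (PySem.Str.split? s ":").getD []
  (PySem.Int.ofStr? (PySem.List.pyGetD p 0 "")).getD 0 * 60
    + (PySem.Int.ofStr? (PySem.List.pyGetD p 1 "")).getD 0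

-- 'a * q + a[:r]': list repetition / slice / concatenation, exact on the admitted inputs (n ≠ 0 under Pre_)
def calcCode (time : Int) (a : String) : String :=
  let n := PySem.Str.len a
  let md := (PySem.Int.divmod? time n).getD (0, 0)
  String.ofList (PySem.List.pyRepeat a.toList md.1 ++ (PySem.Str.slice a none (some md.2)).toList)

def solution (m : String) (musicinfos : List String) : String :=
  let music_answer := (PySem.List.pyRange 0 (PySem.List.len musicinfos) 1).foldl
    (fun (acc : List (Int × Int × String)) i =>
      let info := (PySem.Str.split? (PySem.List.pyGetD musicinfos i "") ",").getD []
      let start_time := PySem.List.pyGetD info 0 ""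
      let end_time := PySem.List.pyGetD info 1 ""
      let title := PySem.List.pyGetD info 2 ""
      let play_code := PySem.List.pyGetD info 3 ""
      let change_code := codeChange m
      let play_change_code := codeChange play_code
      let total_time := convertToTime end_time - convertToTime start_time
      let total_code := calcCode total_time play_change_code
      if PySem.Str.isIn change_code total_code then acc ++ [(total_time, i, title)] else acc) []
  if music_answer = [] then "(None)"
  else (PySem.List.pyGetD
          (PySem.List.sorted2 music_answer (fun x => -x.1) (fun x => x.2.1)) 0 (0, 0, "")).2.2

-- ===== PORT B =====
-- Source B's code_change / to_time are textually A's helpers codeChange / convertToTime; they are reused here.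
def solution_alt (m : String) (musicinfos : List String) : String :=
  let melody := codeChange m
  let best := musicinfos.foldl
    (fun (best : Option (Int × String)) info =>
      let p := (PySem.Str.split? info ",").getD []
      let t := convertToTime (PySem.List.pyGetD p 1 "") - convertToTime (PySem.List.pyGetD p 0 "")
      let sheet := codeChange (PySem.List.pyGetD p 3 "")
      let qr := (PySem.Int.divmod? t (PySem.Str.len sheet)).getD (0, 0)
      let full := String.ofList
        (PySem.List.pyRepeat sheet.toList qr.1 ++ (PySem.Str.slice sheet none (some qr.2)).toList)
      if PySem.Str.isIn melody full && (match best with | none => true | some b => decide (b.1 < t))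
      then some (t, PySem.List.pyGetD p 2 "") else best) none
  match best with | none => "(None)" | some b => b.2

-- ===== PRECONDITION & SPEC =====
-- 'HH:MM' field A can convert: at least two ':'-parts whose first two parse as int
def pvTimeOk (s : String) : Prop :=
  let q := (PySem.Str.split? s ":").getD []
  2 ≤ q.length ∧ (PySem.Int.ofStr? (PySem.List.pyGetD q 0 "")).isSome = true
    ∧ (PySem.Int.ofStr? (PySem.List.pyGetD q 1 "")).isSome = true

-- Pre_ excludes exactly the inputs on which Python A raises: an entry with fewer than four ','-fields
-- (IndexError), a time field int() cannot parse or without a ':' (ValueError/IndexError), or an empty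
-- melody field (ZeroDivisionError in calc).
def Pre_solution (m : String) (musicinfos : List String) : Prop :=
  ∀ s ∈ musicinfos,
    let p := (PySem.Str.split? s ",").getD []
    4 ≤ p.length ∧ pvTimeOk (PySem.List.pyGetD p 0 "") ∧ pvTimeOk (PySem.List.pyGetD p 1 "")
      ∧ PySem.List.pyGetD p 3 "" ≠ ""
instance (m : String) (musicinfos : List String) : Decidable (Pre_solution m musicinfos) := by
  unfold Pre_solution pvTimeOk; infer_instance

def pvWitness_solution : String × List String :=
  ("ABC", ["12:00,12:14,HELLO,C#DEFABCAB", "13:00,13:05,WORLD,ABCDEF"])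

def Spec_solution (m : String) (musicinfos : List String) (out : String) : Prop := out = solution_alt m musicinfos
instance (m : String) (musicinfos : List String) (out : String) : Decidable (Spec_solution m musicinfos out) := by unfold Spec_solution; infer_instance

-- ===== CLAIM (what is proved, stated in full; the proofs are below) =====
def Claim_equal_solution : Prop := ∀ (m : String) (musicinfos : List String), Dom_solution m musicinfos → Pre_solution m musicinfos → Spec_solution m musicinfos (solution m musicinfos)

-- ===== LEMMAS AND PROOFS =====

-- the per-entry data both programs compute
def pvParts (s : String) : List String := (PySem.Str.split? s ",").getD []
def pvT (s : String) : Int :=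
  convertToTime (PySem.List.pyGetD (pvParts s) 1 "") - convertToTime (PySem.List.pyGetD (pvParts s) 0 "")
def pvTitle (s : String) : String := PySem.List.pyGetD (pvParts s) 2 ""
def pvCond (m s : String) : Bool :=
  PySem.Str.isIn (codeChange m) (calcCode (pvT s) (codeChange (PySem.List.pyGetD (pvParts s) 3 "")))

-- A's match list, over enumerate
def pvM (m : String) (mi : List String) : List (Int × Int × String) :=
  (PySem.List.enumerate mi 0).foldl
    (fun acc x => if pvCond m x.2 then acc ++ [(pvT x.2, x.1, pvTitle x.2)] else acc) []

-- B's accumulator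
def pvStepB (m : String) (best : Option (Int × String)) (s : String) : Option (Int × String) :=
  if pvCond m s && (match best with | none => true | some b => decide (b.1 < pvT s))
  then some (pvT s, pvTitle s) else best
def pvB (m : String) (mi : List String) : Option (Int × String) := mi.foldl (pvStepB m) none

theorem foldA_eq (m : String) (mi : List String) :
    (PySem.List.pyRange 0 (PySem.List.len mi) 1).foldl
      (fun (acc : List (Int × Int × String)) i =>
        let info := (PySem.Str.split? (PySem.List.pyGetD mi i "") ",").getD []
        let start_time := PySem.List.pyGetD info 0 ""
        let end_time := PySem.List.pyGetD info 1 ""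
        let title := PySem.List.pyGetD info 2 ""
        let play_code := PySem.List.pyGetD info 3 ""
        let change_code := codeChange m
        let play_change_code := codeChange play_code
        let total_time := convertToTime end_time - convertToTime start_time
        let total_code := calcCode total_time play_change_code
        if PySem.Str.isIn change_code total_code then acc ++ [(total_time, i, title)] else acc) [] =
      pvM m mi := by
  unfold pvM
  rw [PySem.List.enumerate_eq_map_pyRange (d := ""), List.foldl_map]
  rfl

theorem solutionA_eq (m : String) (mi : List String) :
    solution m mi = (if pvM m mi = [] then "(None)"
      else (PySem.List.pyGetD
        (PySem.List.sorted2 (pvM m mi) (fun x => -x.1) (fun x => x.2.1)) 0 (0, 0, "")).2.2) := by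
  unfold solution
  rw [foldA_eq]

theorem solutionB_eq (m : String) (mi : List String) :
    solution_alt m mi = (match pvB m mi with | none => "(None)" | some b => b.2) := by
  unfold solution_alt pvB pvStepB pvCond pvT pvTitle pvParts calcCode
  rfl

theorem head?_insertBy {α : Type} (lt : α → α → Bool) (x : α) (ys : List α) :
    (PySem.List.insertBy lt x ys).head? =
      some (match ys with | [] => x | y :: _ => if lt x y then x else y) := by
  induction ys with
  | nil => rfl
  | cons y t ih =>
    simp only [PySem.List.insertBy]
    split
    · rfl
    · simp

theorem head?_foldl_insertBy {α : Type} (lt : α → α → Bool) (L : List α) (acc : List α) :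
    (L.foldl (fun a x => PySem.List.insertBy lt x a) acc).head? =
      L.foldl (fun (b : Option α) x =>
        match b with | none => some x | some m => if lt x m then some x else some m) acc.head? := by
  induction L generalizing acc with
  | nil => rfl
  | cons x t ih =>
    simp only [List.foldl_cons]
    rw [ih]
    congr 1
    cases acc with
    | nil => rw [head?_insertBy]; rfl
    | cons y ys =>
      rw [head?_insertBy]
      cases h : lt x y <;> simp [h]

theorem head?_sorted2 {α : Type} (L : List α) (k1 k2 : α → Int) :
    (PySem.List.sorted2 L k1 k2).head? = PySem.List.min2? L k1 k2 := by
  simp only [PySem.List.sorted2, PySem.List.min2?]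
  rw [head?_foldl_insertBy]
  rfl

theorem pv_foldl_some {α β : Type} (f : Option β → α → Option β)
    (hf : ∀ b x, f (some b) x ≠ none) : ∀ (L : List α) (b : β), L.foldl f (some b) ≠ none := by
  intro L
  induction L with
  | nil =>
    intro b h
    rw [List.foldl_nil] at h
    simp at h
  | cons x t ih =>
    intro b
    cases h : f (some b) x with
    | none => exact absurd h (hf b x)
    | some b' =>
      simp only [List.foldl_cons, h]
      exact ih b'

theorem min2?_eq_none_iff {α : Type} (L : List α) (k1 k2 : α → Int) :
    PySem.List.min2? L k1 k2 = none ↔ L = [] := by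
  cases L with
  | nil => simp [PySem.List.min2?]
  | cons x t =>
    simp only [PySem.List.min2?, List.foldl_cons]
    constructor
    · intro h
      exact absurd h (pv_foldl_some _ (by intro b y; dsimp only; split <;> simp) t x)
    · intro h; exact absurd h (by simp)

theorem min2?_append_singleton {α : Type} (L : List α) (x : α) (k1 k2 : α → Int) :
    PySem.List.min2? (L ++ [x]) k1 k2 =
      match PySem.List.min2? L k1 k2 with
      | none => some x
      | some mm =>
        if (decide (k1 x < k1 mm) || (!decide (k1 mm < k1 x) && decide (k2 x < k2 mm)))
        then some x else some mm := by
  simp only [PySem.List.min2?, List.foldl_append, List.foldl_cons, List.foldl_nil]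
  rfl

theorem pvM_append (m : String) (t : List String) (s : String) :
    pvM m (t ++ [s]) =
      (if pvCond m s then pvM m t ++ [(pvT s, (t.length : Int), pvTitle s)] else pvM m t) := by
  unfold pvM
  rw [PySem.List.enumerate_append, List.foldl_append]
  simp only [PySem.List.enumerate_cons, PySem.List.enumerate_nil, List.foldl_cons, List.foldl_nil,
    zero_add]

theorem pvInv (m : String) (mi : List String) :
    match PySem.List.min2? (pvM m mi) (fun x => -x.1) (fun x => x.2.1) with
    | none => pvB m mi = none
    | some x => pvB m mi = some (x.1, x.2.2) ∧ x.2.1 < (mi.length : Int) := by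
  induction mi using List.reverseRecOn with
  | nil =>
    have : PySem.List.min2? (pvM m ([] : List String)) (fun x => -x.1) (fun x => x.2.1) = none := rfl
    rw [this]; rfl
  | append_singleton t s ih =>
    have hB : pvB m (t ++ [s]) = pvStepB m (pvB m t) s := by
      simp [pvB, List.foldl_append]
    rw [pvM_append]
    cases hc : pvCond m s with
    | false =>
      have hstep : pvStepB m (pvB m t) s = pvB m t := by
        simp [pvStepB, hc]
      rw [if_neg (by simp), hB, hstep]
      cases hmin : PySem.List.min2? (pvM m t) (fun x => -x.1) (fun x => x.2.1) with
      | none => rw [hmin] at ih; exact ih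
      | some mm =>
        rw [hmin] at ih
        refine ⟨ih.1, ?_⟩
        have := ih.2
        simp only [List.length_append, List.length_cons, List.length_nil]
        push_cast
        omega
    | true =>
      rw [if_pos (by simp)]
      rw [min2?_append_singleton]
      cases hmin : PySem.List.min2? (pvM m t) (fun x => -x.1) (fun x => x.2.1) with
      | none =>
        rw [hmin] at ih
        have hstep : pvStepB m (pvB m t) s = some (pvT s, pvTitle s) := by
          rw [ih]; simp [pvStepB, hc]
        refine ⟨by rw [hB, hstep], ?_⟩
        simp only [List.length_append, List.length_cons, List.length_nil]
        push_cast
        omega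
      | some mm =>
        rw [hmin] at ih
        obtain ⟨ihB, ihlt⟩ := ih
        have hlen : ((t ++ [s]).length : Int) = (t.length : Int) + 1 := by
          simp only [List.length_append, List.length_cons, List.length_nil]
          push_cast
          omega
        have hidx : decide ((t.length : Int) < mm.2.1) = false := by
          simp only [decide_eq_false_iff_not]
          omega
        by_cases hlt : mm.1 < pvT s
        · have hd1 : decide (-pvT s < -mm.1) = true := by
            simp only [decide_eq_true_eq]
            omega
          simp only [hd1, hidx, Bool.true_or, if_true]
          have hstep : pvStepB m (pvB m t) s = some (pvT s, pvTitle s) := by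
            rw [ihB]; simp [pvStepB, hc, hlt]
          exact ⟨by rw [hB, hstep], by rw [hlen]; omega⟩
        · have hd1 : decide (-pvT s < -mm.1) = false := by
            simp only [decide_eq_false_iff_not]
            omega
          simp only [hd1, hidx, Bool.false_or, Bool.and_false]
          have hstep : pvStepB m (pvB m t) s = some (mm.1, mm.2.2) := by
            rw [ihB]; simp [pvStepB, hc, hlt]
          exact ⟨by rw [hB, hstep], by rw [hlen]; omega⟩

theorem head?_eq_pyGetD {α : Type} (l : List α) (x : α) (d : α) (h : l.head? = some x) :
    PySem.List.pyGetD l 0 d = x := by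
  cases l with
  | nil => simp at h
  | cons y t =>
    have : y = x := by simpa using h
    rw [PySem.List.pyGetD_zero_cons, this]

-- ===== VERDICT (by name: the statement is the Claim_ definition above) =====
theorem solution_spec : Claim_equal_solution := by
  intro m mi _ _
  unfold Spec_solution
  rw [solutionA_eq, solutionB_eq]
  have hinv := pvInv m mi
  by_cases hM : pvM m mi = []
  · have hmin : PySem.List.min2? (pvM m mi) (fun x => -x.1) (fun x => x.2.1) = none :=
      (min2?_eq_none_iff _ _ _).mpr hM
    rw [hmin] at hinv
    rw [if_pos hM, hinv]
  · have hns : PySem.List.min2? (pvM m mi) (fun x => -x.1) (fun x => x.2.1) ≠ none :=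
      fun h => hM ((min2?_eq_none_iff _ _ _).mp h)
    obtain ⟨x, hx⟩ := Option.ne_none_iff_exists'.mp hns
    rw [hx] at hinv
    have hhead : (PySem.List.sorted2 (pvM m mi) (fun x => -x.1) (fun x => x.2.1)).head? = some x := by
      rw [head?_sorted2, hx]
    rw [if_neg hM, hinv.1, head?_eq_pyGetD _ x _ hhead]
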